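-- pv_equiv track=rewrite | github.com/icrayix/adventofcode-24 | Day-12/python/paul2708/day12.py | reduce_neighbours
-- ===== SOURCE A (Python) =====
-- from typing import Tuple, List, Set
--
-- def reduce_neighbours(tuples: List[Tuple[int, int]]) -> List[Tuple[int, int]]:
--     for i in range(len(tuples) - 1):
--         for j in range(i, len(tuples)):
--             if tuples[i][0] == tuples[j][0] and abs(tuples[i][1] - tuples[j][1]) == 1 or \
--                     tuples[i][1] == tuples[j][1] and abs(tuples[i][0] - tuples[j][0]) == 1:
--                 del tuples[i]
--                 return reduce_neighbours(tuples)
--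
--     return tuples
-- ===== SOURCE B (Python) =====
-- def reduce_neighbours(tuples):
--     seen = set()
--     out = []
--     for x, y in reversed(tuples):
--         if not any(n in seen for n in ((x + 1, y), (x - 1, y), (x, y + 1), (x, y - 1))):
--             out.append((x, y))
--         seen.add((x, y))
--     out.reverse()
--     return out
-- ===== Notes on version B (the rewrite author's own statement) =====
-- stated objective: faster
-- what changed: A repeatedly rescans the whole list with two nested index loops and restarts from scratch after each deletion; B makes a single reverse pass keeping a hash set of already-seen coordinates and drops an element iff one of its four neighbour coordinates was seen, with no mutation and no restarts.
import Mathlib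
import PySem

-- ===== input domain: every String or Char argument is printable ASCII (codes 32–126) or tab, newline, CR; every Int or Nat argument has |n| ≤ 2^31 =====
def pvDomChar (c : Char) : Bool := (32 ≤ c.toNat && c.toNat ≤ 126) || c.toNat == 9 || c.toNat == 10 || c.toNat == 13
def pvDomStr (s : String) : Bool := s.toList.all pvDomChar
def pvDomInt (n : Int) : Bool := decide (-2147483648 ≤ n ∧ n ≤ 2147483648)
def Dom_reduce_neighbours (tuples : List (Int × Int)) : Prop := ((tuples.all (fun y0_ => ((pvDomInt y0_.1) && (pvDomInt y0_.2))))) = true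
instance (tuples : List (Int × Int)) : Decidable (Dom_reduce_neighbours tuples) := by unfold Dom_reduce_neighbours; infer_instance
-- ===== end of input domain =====

-- B replaces A's restart-after-each-deletion recursion by a single reverse pass with a set of
-- already-seen coordinates (objective: faster). A mutates its argument in place (del tuples[i]);
-- B does not — the equivalence proved here is about the RETURN value only.

-- ===== PORT A =====
-- adjacency test, literally Python's 'tuples[i][0] == tuples[j][0] and abs(...) == 1 or ...'
def pvAdj (a b : Int × Int) : Bool :=
  (a.1 == b.1 && (a.2 - b.2).natAbs == 1) || (a.2 == b.2 && (a.1 - b.1).natAbs == 1)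

-- the two nested for-loops with early return: first i (if any) whose row scan finds a neighbour
def pvHit (ts : List (Int × Int)) : Option Int :=
  (PySem.List.pyRange 0 ((ts.length : Int) - 1) 1).find? (fun i =>
    (PySem.List.pyRange i (ts.length : Int) 1).any (fun j =>
      match PySem.List.pyGet? ts i, PySem.List.pyGet? ts j with
      | some a, some b => pvAdj a b
      | _, _ => false))

-- 'del tuples[i]; return reduce_neighbours(tuples)': each call deletes one element, so
-- tuples.length is enough fuel (a totality guard only; the 0-fuel branch is unreachable)
def pvReduceA : Nat → List (Int × Int) → List (Int × Int)
  | 0, ts => ts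
  | f + 1, ts =>
    match pvHit ts with
    | some i => pvReduceA f (ts.eraseIdx i.toNat)
    | none => ts

def reduce_neighbours (tuples : List (Int × Int)) : List (Int × Int) :=
  pvReduceA tuples.length tuples

-- ===== PORT B =====
-- one loop body of Source B: check the four neighbours against 'seen', append, add to 'seen'
def pvStep (st : PySem.Set (Int × Int) × List (Int × Int)) (t : Int × Int) :
    PySem.Set (Int × Int) × List (Int × Int) :=
  let out := if [(t.1 + 1, t.2), (t.1 - 1, t.2), (t.1, t.2 + 1), (t.1, t.2 - 1)].any
      (fun n => PySem.Set.contains st.1 n) then st.2 else st.2 ++ [t]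
  (PySem.Set.add st.1 t, out)

def reduce_neighbours_alt (tuples : List (Int × Int)) : List (Int × Int) :=
  (tuples.reverse.foldl pvStep (PySem.Set.empty, [])).2.reverse

-- ===== PRECONDITION & SPEC =====
def Spec_reduce_neighbours (tuples : List (Int × Int)) (out : List (Int × Int)) : Prop := out = reduce_neighbours_alt tuples
instance (tuples : List (Int × Int)) (out : List (Int × Int)) : Decidable (Spec_reduce_neighbours tuples out) := by unfold Spec_reduce_neighbours; infer_instance

-- ===== CLAIM (what is proved, stated in full; the proofs are below) =====
def Claim_equal_reduce_neighbours : Prop := ∀ (tuples : List (Int × Int)), Dom_reduce_neighbours tuples → Spec_reduce_neighbours tuples (reduce_neighbours tuples)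

-- ===== LEMMAS AND PROOFS =====

-- the common functional description: keep an element iff no later element is adjacent to it
def keepF : List (Int × Int) → List (Int × Int)
  | [] => []
  | t :: rest => if rest.any (fun u => pvAdj t u) then keepF rest else t :: keepF rest

lemma pvAdj_irrefl (t : Int × Int) : pvAdj t t = false := by
  rcases t with ⟨x, y⟩; simp [pvAdj]

lemma pvAdj_iff_mem (t u : Int × Int) :
    pvAdj t u = true ↔ u ∈ [(t.1 + 1, t.2), (t.1 - 1, t.2), (t.1, t.2 + 1), (t.1, t.2 - 1)] := by
  rcases t with ⟨x, y⟩; rcases u with ⟨a, b⟩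
  simp [pvAdj, Int.natAbs_eq_iff, Prod.ext_iff]
  omega

-- ----- B's port computes keepF -----

lemma B_foldr (ts : List (Int × Int)) :
    (∀ u, u ∈ (ts.foldr (fun t st => pvStep st t) (PySem.Set.empty, [])).1 ↔ u ∈ ts) ∧
    (ts.foldr (fun t st => pvStep st t) (PySem.Set.empty, [])).2 = (keepF ts).reverse := by
  induction ts with
  | nil => exact ⟨fun u => Iff.rfl, rfl⟩
  | cons t rest ih =>
    obtain ⟨hmem, hout⟩ := ih
    simp only [List.foldr_cons]
    set st := List.foldr (fun t st => pvStep st t) (PySem.Set.empty, []) rest with hst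
    have hcond : ([(t.1 + 1, t.2), (t.1 - 1, t.2), (t.1, t.2 + 1), (t.1, t.2 - 1)].any
        (fun n => PySem.Set.contains st.1 n)) = rest.any (fun u => pvAdj t u) := by
      rcases Bool.eq_false_or_eq_true (rest.any (fun u => pvAdj t u)) with h | h <;> rw [h]
      · rw [List.any_eq_true] at h ⊢
        obtain ⟨u, hu, hadj⟩ := h
        exact ⟨u, (pvAdj_iff_mem t u).mp hadj, by simp [hmem, hu]⟩
      · rw [List.any_eq_false] at h ⊢
        intro n hn
        rw [PySem.Set.contains_iff, hmem]
        intro hmemn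
        exact absurd ((pvAdj_iff_mem t n).mpr hn) (by simpa using h n hmemn)
    constructor
    · intro u
      show u ∈ PySem.Set.add st.1 t ↔ _
      rw [PySem.Set.mem_add, hmem u, List.mem_cons]
      tauto
    · show (if _ then st.2 else st.2 ++ [t]) = _
      rw [hcond, keepF]
      split
      · exact hout
      · simp [hout]

lemma B_eq_keepF (ts : List (Int × Int)) : reduce_neighbours_alt ts = keepF ts := by
  unfold reduce_neighbours_alt
  rw [List.foldl_reverse]
  rw [(B_foldr ts).2]
  simp

-- ----- A's port computes keepF -----

-- index form of the inner row scan
lemma pvRow_iff (ts : List (Int × Int)) (i : Int) (hi0 : 0 ≤ i) (hin : i < (ts.length : Int)) :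
    ((PySem.List.pyRange i (ts.length : Int) 1).any (fun j =>
      match PySem.List.pyGet? ts i, PySem.List.pyGet? ts j with
      | some a, some b => pvAdj a b
      | _, _ => false)) = true ↔
    ∃ j : Nat, i.toNat ≤ j ∧ ∃ hj : j < ts.length,
      pvAdj (ts[i.toNat]'(by omega)) (ts[j]'hj) = true := by
  rw [List.any_eq_true]
  constructor
  · rintro ⟨j, hjmem, hpred⟩
    rw [PySem.List.mem_pyRange_one] at hjmem
    obtain ⟨hij, hjn⟩ := hjmem
    have hj0 : 0 ≤ j := le_trans hi0 hij
    rw [PySem.List.pyGet?_eq_some_getElem ts hi0 hin,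
        PySem.List.pyGet?_eq_some_getElem ts hj0 hjn] at hpred
    exact ⟨j.toNat, by omega, by omega, hpred⟩
  · rintro ⟨j, hij, hj, hadj⟩
    refine ⟨(j : Int), ?_, ?_⟩
    · rw [PySem.List.mem_pyRange_one]; omega
    · rw [PySem.List.pyGet?_eq_some_getElem ts hi0 hin,
          PySem.List.pyGet?_eq_some_getElem ts (i := (j : Int)) (by omega) (by exact_mod_cast hj)]
      simpa using hadj

lemma keepF_of_pairwise : ∀ ts : List (Int × Int),
    ts.Pairwise (fun a b => pvAdj a b = false) → keepF ts = ts := by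
  intro ts hpw
  induction ts with
  | nil => rfl
  | cons t rest ih =>
    rw [List.pairwise_cons] at hpw
    rw [keepF, if_neg, ih hpw.2]
    simp only [List.any_eq_true, not_exists]
    intro u hu
    exact absurd hu.2 (by simp [hpw.1 u hu.1])

lemma keepF_of_no_hit (ts : List (Int × Int)) (h : pvHit ts = none) : keepF ts = ts := by
  unfold pvHit at h
  rw [List.find?_eq_none] at h
  apply keepF_of_pairwise
  rw [List.pairwise_iff_getElem]
  intro a b ha hb hab
  by_contra hadj
  have hmem : (a : Int) ∈ PySem.List.pyRange 0 ((ts.length : Int) - 1) 1 := by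
    rw [PySem.List.mem_pyRange_one]; omega
  apply h _ hmem
  rw [pvRow_iff ts a (by omega) (by exact_mod_cast ha)]
  refine ⟨b, by omega, hb, ?_⟩
  simpa using Bool.not_eq_false _ |>.mp (by simpa using hadj)

lemma hit_bounds (ts : List (Int × Int)) (i : Int) (h : pvHit ts = some i) :
    0 ≤ i ∧ i < (ts.length : Int) - 1 := by
  have := List.mem_of_find?_eq_some h
  rwa [PySem.List.mem_pyRange_one] at this

-- everything strictly before a hit has no adjacent element at or after its own position
lemma hit_earlier_false (ts : List (Int × Int)) (i : Int) (h : pvHit ts = some i)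
    (i' : Int) (h0 : 0 ≤ i') (hlt : i' < i) :
    ¬ ((PySem.List.pyRange i' (ts.length : Int) 1).any (fun j =>
      match PySem.List.pyGet? ts i', PySem.List.pyGet? ts j with
      | some a, some b => pvAdj a b
      | _, _ => false)) = true := by
  have hb := hit_bounds ts i h
  unfold pvHit at h
  rw [List.find?_eq_some_iff_append] at h
  obtain ⟨-, as, bs, hsplit, hfalse⟩ := h
  have hmem : i' ∈ PySem.List.pyRange 0 ((ts.length : Int) - 1) 1 := by
    rw [PySem.List.mem_pyRange_one]; omega
  have hpw := PySem.List.pairwise_lt_pyRange_one (a := (0 : Int)) (b := (ts.length : Int) - 1)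
  rw [hsplit] at hmem hpw
  rw [List.pairwise_append] at hpw
  have : i' ∈ as := by
    rcases List.mem_append.mp hmem with h1 | h1
    · exact h1
    · exfalso
      rcases List.mem_cons.mp h1 with h2 | h2
      · omega
      · have := (List.pairwise_cons.mp hpw.2.1).1 i' h2
        omega
  simpa using hfalse i' this

lemma keepF_append : ∀ (pre l : List (Int × Int)),
    (∀ p (hp : p < pre.length), ((pre.drop (p + 1) ++ l).any (fun u => pvAdj (pre[p]'hp) u)) = false) →
    keepF (pre ++ l) = pre ++ keepF l := by
  intro pre
  induction pre with
  | nil => intro l _; rfl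
  | cons a pre' ih =>
    intro l H
    have H0 := H 0 (by simp)
    simp only [List.drop_succ_cons, List.drop_zero, List.getElem_cons_zero] at H0
    have H' : ∀ p (hp : p < pre'.length),
        ((pre'.drop (p + 1) ++ l).any (fun u => pvAdj (pre'[p]'hp) u)) = false := by
      intro p hp
      have := H (p + 1) (by simpa using Nat.succ_lt_succ hp)
      simpa using this
    rw [List.cons_append, keepF, if_neg (by simp [H0]), ih l H']
    simp

lemma any_false_of_cons (pre suf : List (Int × Int)) (t v : Int × Int)
    (h : ((pre ++ t :: suf).any (fun u => pvAdj v u)) = false) :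
    ((pre ++ suf).any (fun u => pvAdj v u)) = false := by
  simp only [List.any_eq_false] at h ⊢
  intro u hu
  apply h
  rcases List.mem_append.mp hu with h1 | h1
  · exact List.mem_append.mpr (Or.inl h1)
  · exact List.mem_append.mpr (Or.inr (List.mem_cons_of_mem _ h1))

lemma keepF_erase_of_hit (ts : List (Int × Int)) (i : Int) (h : pvHit ts = some i) :
    keepF (ts.eraseIdx i.toNat) = keepF ts := by
  have hb := hit_bounds ts i h
  set n := ts.length with hn
  set k := i.toNat with hk
  have hkn : k < n := by omega
  have h2 := h
  unfold pvHit at h2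
  rw [List.find?_eq_some_iff_append] at h2
  have hpred := h2.1
  rw [pvRow_iff ts i (by omega) (by omega)] at hpred
  -- decompose ts
  have hdrop : ts.drop k = ts[k] :: ts.drop (k + 1) := List.drop_eq_getElem_cons hkn
  have hts : ts = ts.take k ++ ts[k] :: ts.drop (k + 1) := by
    conv_lhs => rw [← List.take_append_drop k ts]
    rw [hdrop]
  set pre := ts.take k with hpre
  set t := ts[k] with ht
  set suf := ts.drop (k + 1) with hsuf
  have hprelen : pre.length = k := List.length_take_of_le (by omega)
  -- the element at the hit really has a later neighbour
  have hsufany : suf.any (fun u => pvAdj t u) = true := by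
    obtain ⟨j, hkj, hj, hadj⟩ := hpred
    have hne : k ≠ j := by
      intro hkj'; subst hkj'
      rw [pvAdj_irrefl] at hadj; exact absurd hadj (by simp)
    have hjk : k + 1 ≤ j := by omega
    rw [List.any_eq_true]
    refine ⟨suf[j - (k + 1)]'(by rw [hsuf, List.length_drop]; omega), List.getElem_mem _, ?_⟩
    have h1 : suf[j - (k + 1)]'(by rw [hsuf, List.length_drop]; omega)
        = ts[(k + 1) + (j - (k + 1))]'(by omega) := List.getElem_drop
    have h2' : ts[(k + 1) + (j - (k + 1))]'(by omega) = ts[j]'hj := by congr 1; omega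
    rw [h1, h2']
    exact hadj
  -- elements before the hit have no adjacent element anywhere after them
  have hpreH : ∀ p (hp : p < pre.length),
      ((pre.drop (p + 1) ++ t :: suf).any (fun u => pvAdj (pre[p]'hp) u)) = false := by
    intro p hp
    have hpk : p < k := by rwa [hprelen] at hp
    have hsplit : pre.drop (p + 1) ++ t :: suf = ts.drop (p + 1) := by
      conv_rhs => rw [hts]
      rw [List.drop_append_of_le_length (by omega)]
    have hgp : pre[p]'hp = ts[p]'(by omega) := List.getElem_take
    rw [hsplit, hgp]
    by_contra hany
    have hany' := Bool.not_eq_false _ |>.mp hany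
    rw [List.any_eq_true] at hany'
    obtain ⟨u, hu, hadj⟩ := hany'
    obtain ⟨m, hm, hum⟩ := List.mem_iff_getElem.mp hu
    have hmlen : p + 1 + m < n := by
      have hdl : (ts.drop (p + 1)).length = ts.length - (p + 1) := List.length_drop
      omega
    apply hit_earlier_false ts i h (p : Int) (by omega) (by omega)
    rw [pvRow_iff ts (p : Int) (by omega) (by omega)]
    refine ⟨p + 1 + m, by omega, hmlen, ?_⟩
    have hge : (ts.drop (p + 1))[m]'hm = ts[(p + 1) + m]'(by omega) := List.getElem_drop
    rw [hge] at hum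
    subst hum
    simpa using hadj
  have hsufH : ∀ p (hp : p < pre.length),
      ((pre.drop (p + 1) ++ suf).any (fun u => pvAdj (pre[p]'hp) u)) = false := by
    intro p hp
    exact any_false_of_cons _ _ _ _ (hpreH p hp)
  have herase : ts.eraseIdx k = pre ++ suf := by
    rw [List.eraseIdx_eq_take_drop_succ]
  rw [herase, keepF_append pre suf hsufH]
  conv_rhs => rw [hts]
  rw [keepF_append pre (t :: suf) hpreH, keepF, if_pos hsufany]

lemma A_eq_keepF_aux : ∀ (f : Nat) (ts : List (Int × Int)), ts.length ≤ f →
    pvReduceA f ts = keepF ts := by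
  intro f
  induction f with
  | zero =>
    intro ts h
    have : ts = [] := List.length_eq_zero_iff.mp (Nat.le_zero.mp h)
    subst this; rfl
  | succ f ih =>
    intro ts h
    rw [pvReduceA]
    cases hh : pvHit ts with
    | none => exact (keepF_of_no_hit ts hh).symm
    | some i =>
      have hb := hit_bounds ts i hh
      show pvReduceA f (ts.eraseIdx i.toNat) = keepF ts
      have hlen : (ts.eraseIdx i.toNat).length ≤ f := by
        rw [List.length_eraseIdx_of_lt (by omega)]; omega
      rw [ih _ hlen, keepF_erase_of_hit ts i hh]

-- ===== VERDICT (by name: the statement is the Claim_ definition above) =====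
theorem reduce_neighbours_spec : Claim_equal_reduce_neighbours := by
  intro ts _
  show _ = _
  rw [B_eq_keepF]
  exact A_eq_keepF_aux ts.length ts le_rfl
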